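-- pv_equiv track=rewrite | github.com/haoxuandudu/IBI1_2023-24 | Practical 9/Favourite James Bond.py | favorite_bond
-- ===== SOURCE A (Python) =====
-- def favorite_bond(year_born):
--     bond_actors = {
--         1973: "Roger Moore",
--         1987: "Timothy Dalton",
--         1995: "Pierce Brosnan",
--         2006: "Daniel Craig"
--     }
--
--     for year, actor in sorted(bond_actors.items(), reverse=True):
--         if year <= year_born:
--             return f"Your favorite James Bond actor is {actor}."
--
--     return "Sorry, we couldn't determine your favorite James Bond actor."
-- ===== SOURCE B (Python) =====
-- def favorite_bond(year_born):
--     years = [1973, 1987, 1995, 2006]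
--     actors = ["Roger Moore", "Timothy Dalton", "Pierce Brosnan", "Daniel Craig"]
--     # binary search: lo ends as the number of thresholds <= year_born
--     lo, hi = 0, len(years)
--     while lo < hi:
--         mid = (lo + hi) // 2
--         if years[mid] <= year_born:
--             lo = mid + 1
--         else:
--             hi = mid
--     if lo == 0:
--         return "Sorry, we couldn't determine your favorite James Bond actor."
--     return f"Your favorite James Bond actor is {actors[lo - 1]}."
-- ===== Notes on version B (the rewrite author's own statement) =====
-- stated objective: alternative
-- what changed: Replaces the dict + reverse-sorted first-match scan with a hand-written binary search (bisect_right) over the ascending threshold list, then indexes a parallel actor list with the resulting insertion point.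
import Mathlib
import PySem

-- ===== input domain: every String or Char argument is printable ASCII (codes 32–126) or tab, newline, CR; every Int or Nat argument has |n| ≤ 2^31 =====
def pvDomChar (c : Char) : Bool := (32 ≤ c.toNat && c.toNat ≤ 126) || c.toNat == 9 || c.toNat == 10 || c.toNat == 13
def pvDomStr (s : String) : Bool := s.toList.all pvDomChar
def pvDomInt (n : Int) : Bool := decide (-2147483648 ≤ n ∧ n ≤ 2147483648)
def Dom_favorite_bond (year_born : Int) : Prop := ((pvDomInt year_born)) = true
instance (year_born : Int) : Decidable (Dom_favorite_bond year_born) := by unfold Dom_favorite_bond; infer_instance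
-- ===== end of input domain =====

-- B replaces A's dict + reverse-sorted first-match scan with a binary search over the
-- ascending threshold list plus an index into a parallel actor list (alternative algorithm).

-- ===== PORT A =====
-- the for-loop over the reverse-sorted items: first (year, actor) with year ≤ year_born wins
def favorite_bond_loop (year_born : Int) : List (Int × String) → String
  | [] => "Sorry, we couldn't determine your favorite James Bond actor."
  | (year, actor) :: rest =>
    if year ≤ year_born then "Your favorite James Bond actor is " ++ actor ++ "."
    else favorite_bond_loop year_born rest

def favorite_bond (year_born : Int) : String :=
  let bond_actors : PySem.Dict Int String :=
    ((((PySem.Dict.empty).insert 1973 "Roger Moore").insert 1987 "Timothy Dalton").insert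
        1995 "Pierce Brosnan").insert 2006 "Daniel Craig"
  favorite_bond_loop year_born
    (PySem.List.sorted2 bond_actors.items (fun p => p.1) (fun p => p.2) true)

-- ===== PORT B =====
-- the while-loop of Source B's binary search; returns the final lo (insertion point).
-- indices are always in range, so years[mid] is ported with getD (noted: exact here).
def favorite_bond_bsearch (year_born : Int) (years : List Int) (lo hi : Nat) : Nat :=
  if lo < hi then
    let mid := (lo + hi) / 2
    if years.getD mid 0 ≤ year_born then favorite_bond_bsearch year_born years (mid + 1) hi
    else favorite_bond_bsearch year_born years lo mid
  else lo
  termination_by hi - lo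
  decreasing_by all_goals omega

def favorite_bond_alt (year_born : Int) : String :=
  let years : List Int := [1973, 1987, 1995, 2006]
  let actors : List String := ["Roger Moore", "Timothy Dalton", "Pierce Brosnan", "Daniel Craig"]
  let lo := favorite_bond_bsearch year_born years 0 years.length
  if lo = 0 then "Sorry, we couldn't determine your favorite James Bond actor."
  else "Your favorite James Bond actor is " ++ actors.getD (lo - 1) "" ++ "."

-- ===== PRECONDITION & SPEC =====
def Spec_favorite_bond (year_born : Int) (out : String) : Prop := out = favorite_bond_alt year_born
instance (year_born : Int) (out : String) : Decidable (Spec_favorite_bond year_born out) := by unfold Spec_favorite_bond; infer_instance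

-- ===== CLAIM (what is proved, stated in full; the proofs are below) =====
def Claim_equal_favorite_bond : Prop := ∀ (year_born : Int), Dom_favorite_bond year_born → Spec_favorite_bond year_born (favorite_bond year_born)

-- ===== LEMMAS AND PROOFS =====
-- the reverse-sorted items of the literal dict, evaluated once
theorem favorite_bond_sorted_eval :
    PySem.List.sorted2
      (((((PySem.Dict.empty).insert 1973 "Roger Moore").insert 1987 "Timothy Dalton").insert
          1995 "Pierce Brosnan").insert 2006 "Daniel Craig" : PySem.Dict Int String).items
      (fun p => p.1) (fun p => p.2) true
    = [(2006, "Daniel Craig"), (1995, "Pierce Brosnan"), (1987, "Timothy Dalton"),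
       (1973, "Roger Moore")] := by decide

-- ===== VERDICT (by name: the statement is the Claim_ definition above) =====
theorem favorite_bond_spec : Claim_equal_favorite_bond := by
  intro year_born _
  unfold Spec_favorite_bond favorite_bond favorite_bond_alt
  simp only [favorite_bond_sorted_eval, favorite_bond_loop, List.length]
  by_cases h6 : (2006:Int) ≤ year_born <;> by_cases h5 : (1995:Int) ≤ year_born <;>
    by_cases h8 : (1987:Int) ≤ year_born <;> by_cases h3 : (1973:Int) ≤ year_born <;>
    first
      | (simp [favorite_bond_bsearch, h6, h5, h8, h3]; done)
      | (simp [favorite_bond_bsearch, h6, h5, h8, h3]; omega)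
      | omega
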